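-- pv_equiv track=rewrite | github.com/yifan19860831-hub/rustchain-bounties | submissions/327-edsac-miner/simulator/edsac.py | mine_python
-- ===== SOURCE A (Python) =====
-- from typing import Optional, Dict, List, Tuple
--
-- def mine_python(header: int, target: int) -> Tuple[int, int]:
--     """
--     Python reference implementation of the mining algorithm.
--
--     Args:
--         header: Block header (17-bit)
--         target: Mining target (17-bit)
--
--     Returns:
--         Tuple of (nonce, hash) if found, (-1, -1) if not
--     """
--     PRIME1 = 7919
--     PRIME2 = 104729
--     MODULUS = 16384
--
--     for nonce in range(16384):
--         hash_val = (header * PRIME1 + nonce * PRIME2) % MODULUS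
--         if hash_val < target:
--             return nonce, hash_val
--
--     return -1, -1
-- ===== SOURCE B (Python) =====
-- def mine_python(header: int, target: int) -> tuple:
--     """Closed-form inversion: enumerate hash residues t < target and invert the
--     affine hash to recover the nonce, keeping the smallest nonce seen."""
--     MODULUS = 16384
--     INV = 13097  # modular inverse of 104729 % 16384 == 6425 modulo 16384
--     base = (header * 7919) % MODULUS
--     best = None
--     for t in range(min(target, MODULUS)):
--         nonce = ((t - base) * INV) % MODULUS
--         if best is None or nonce < best[0]:
--             best = (nonce, t)
--     if best is None:
--         return -1, -1
--     return best
-- ===== Notes on version B (the rewrite author's own statement) =====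
-- stated objective: alternative
-- what changed: Instead of scanning nonces 0..16383 and hashing each until one hashes below target, B enumerates the hash residues t in range(min(target, 16384)), inverts the affine hash with the precomputed modular inverse 13097 of 104729 mod 16384 to get the unique nonce hashing to t, and returns the minimal such nonce with its residue.
import Mathlib
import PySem

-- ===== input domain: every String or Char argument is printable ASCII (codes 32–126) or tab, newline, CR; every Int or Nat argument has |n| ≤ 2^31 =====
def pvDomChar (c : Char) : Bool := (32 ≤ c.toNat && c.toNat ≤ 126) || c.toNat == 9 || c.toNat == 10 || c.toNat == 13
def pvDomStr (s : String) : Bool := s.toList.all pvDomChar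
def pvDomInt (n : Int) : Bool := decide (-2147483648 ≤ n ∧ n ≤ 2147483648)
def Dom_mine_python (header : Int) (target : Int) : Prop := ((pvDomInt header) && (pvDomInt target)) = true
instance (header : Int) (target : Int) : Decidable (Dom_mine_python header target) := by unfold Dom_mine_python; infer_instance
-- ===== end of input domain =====

-- B replaces A's linear scan over nonces by inverting the affine hash over the target residues
-- and tracking the minimal preimage nonce (objective: alternative algorithm, same-order cost).

-- ===== PORT A =====
-- A's for-loop over range(16384) with an early return, as structural recursion over the range list.
def mineLoopA (header : Int) (target : Int) : List Int → Int × Int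
  | [] => (-1, -1)
  | n :: ns =>
    let hashVal := PySem.Int.mod (header * 7919 + n * 104729) 16384
    if hashVal < target then (n, hashVal) else mineLoopA header target ns

def mine_python (header : Int) (target : Int) : Int × Int :=
  mineLoopA header target (PySem.List.pyRange 0 16384 1)

-- ===== PORT B =====
-- nonce = ((t - base) * INV) % MODULUS  (INV = 13097 inverts 104729 % 16384 modulo 16384)
def invNonce (base : Int) (t : Int) : Int :=
  PySem.Int.mod ((t - base) * 13097) 16384

def mine_python_alt (header : Int) (target : Int) : Int × Int :=
  let base := PySem.Int.mod (header * 7919) 16384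
  let best := (PySem.List.pyRange 0 (min target 16384) 1).foldl
    (fun best t =>
      let nonce := invNonce base t
      match best with
      | none => some (nonce, t)
      | some b => if nonce < b.1 then some (nonce, t) else some b)
    none
  match best with
  | none => (-1, -1)
  | some b => b

-- ===== PRECONDITION & SPEC =====
def Spec_mine_python (header : Int) (target : Int) (out : Int × Int) : Prop := out = mine_python_alt header target
instance (header : Int) (target : Int) (out : Int × Int) : Decidable (Spec_mine_python header target out) := by unfold Spec_mine_python; infer_instance

-- ===== CLAIM (what is proved, stated in full; the proofs are below) =====
def Claim_equal_mine_python : Prop := ∀ (header : Int) (target : Int), Dom_mine_python header target → Spec_mine_python header target (mine_python header target)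

-- ===== LEMMAS AND PROOFS =====

-- the hash A computes, with Python mod replaced by emod (the divisor is positive)
def hashA (header n : Int) : Int := (header * 7919 + n * 104729) % 16384

lemma mod_pos_eq (a : Int) : PySem.Int.mod a 16384 = a % 16384 :=
  PySem.Int.mod_eq_emod_of_pos (by norm_num)

lemma mod_hashA (header n : Int) :
    PySem.Int.mod (header * 7919 + n * 104729) 16384 = hashA header n :=
  mod_pos_eq _

lemma hashA_bounds (header n : Int) : 0 ≤ hashA header n ∧ hashA header n < 16384 :=
  ⟨Int.emod_nonneg _ (by norm_num), Int.emod_lt_of_pos _ (by norm_num)⟩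

lemma invNonce_bounds (base t : Int) : 0 ≤ invNonce base t ∧ invNonce base t < 16384 := by
  unfold invNonce
  rw [mod_pos_eq]
  exact ⟨Int.emod_nonneg _ (by norm_num), Int.emod_lt_of_pos _ (by norm_num)⟩

lemma emod_self_modeq (a : Int) : Int.ModEq 16384 (a % 16384) a := by
  unfold Int.ModEq
  exact Int.emod_emod_of_dvd a dvd_rfl

lemma inv_key : Int.ModEq 16384 (13097 * 104729) 1 := by decide

-- round trip: hashing the inverted nonce gives back the residue
lemma hash_invNonce (header t : Int) (h0 : 0 ≤ t) (h1 : t < 16384) :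
    hashA header (invNonce (PySem.Int.mod (header * 7919) 16384) t) = t := by
  unfold hashA invNonce
  rw [mod_pos_eq, mod_pos_eq]
  have e1 : Int.ModEq 16384 (((t - header * 7919 % 16384) * 13097) % 16384 * 104729)
      ((t - header * 7919 % 16384) * 13097 * 104729) :=
    (emod_self_modeq _).mul_right 104729
  have e2 : Int.ModEq 16384 (header * 7919) (header * 7919 % 16384) :=
    (emod_self_modeq _).symm
  have e3 : Int.ModEq 16384
      (header * 7919 + ((t - header * 7919 % 16384) * 13097) % 16384 * 104729)
      (header * 7919 % 16384 + (t - header * 7919 % 16384) * 13097 * 104729) :=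
    e2.add e1
  have e4 : Int.ModEq 16384 ((t - header * 7919 % 16384) * (13097 * 104729))
      ((t - header * 7919 % 16384) * 1) := inv_key.mul_left _
  have e5 : Int.ModEq 16384
      (header * 7919 % 16384 + (t - header * 7919 % 16384) * 13097 * 104729) t := by
    have := e4.add_left (header * 7919 % 16384)
    rw [show (t - header * 7919 % 16384) * (13097 * 104729)
        = (t - header * 7919 % 16384) * 13097 * 104729 by ring] at this
    rw [show header * 7919 % 16384 + (t - header * 7919 % 16384) * 1 = t by ring] at this
    exact this
  have htot := e3.trans e5
  have hfin : (header * 7919 + ((t - header * 7919 % 16384) * 13097) % 16384 * 104729)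
      % 16384 = t % 16384 := htot
  rw [hfin, Int.emod_eq_of_lt h0 h1]

-- round trip the other way: inverting the hash of a nonce gives back the nonce
lemma invNonce_hash (header n : Int) (h0 : 0 ≤ n) (h1 : n < 16384) :
    invNonce (PySem.Int.mod (header * 7919) 16384) (hashA header n) = n := by
  unfold hashA invNonce
  rw [mod_pos_eq, mod_pos_eq]
  have e1 : Int.ModEq 16384
      (((header * 7919 + n * 104729) % 16384 - header * 7919 % 16384) * 13097)
      ((header * 7919 + n * 104729 - header * 7919) * 13097) :=
    ((emod_self_modeq _).sub (emod_self_modeq _)).mul_right 13097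
  have e2 : Int.ModEq 16384 (n * (13097 * 104729)) (n * 1) := inv_key.mul_left n
  have e3 : Int.ModEq 16384
      ((header * 7919 + n * 104729 - header * 7919) * 13097) n := by
    rw [show (header * 7919 + n * 104729 - header * 7919) * 13097
        = n * (13097 * 104729) by ring]
    rw [show (n : Int) = n * 1 from (mul_one n).symm]
    exact (mul_one n).symm ▸ e2
  have htot := e1.trans e3
  have hfin : (((header * 7919 + n * 104729) % 16384 - header * 7919 % 16384) * 13097)
      % 16384 = n % 16384 := htot
  rw [hfin, Int.emod_eq_of_lt h0 h1]

-- A's loop: returns (-1,-1) when nothing in the remaining range qualifies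
lemma loopA_none (header target : Int) (a : Int)
    (h : ∀ n, a ≤ n → n < 16384 → ¬ hashA header n < target) :
    mineLoopA header target (PySem.List.pyRange a 16384 1) = (-1, -1) := by
  by_cases hab : (16384 : Int) ≤ a
  · rw [PySem.List.pyRange_one_eq_nil hab]; rfl
  · have hlt : a < 16384 := by omega
    rw [PySem.List.pyRange_one_cons hlt]
    unfold mineLoopA
    simp only [mod_hashA]
    rw [if_neg (h a le_rfl hlt)]
    exact loopA_none header target (a + 1) (fun n hn h2 => h n (by omega) h2)
termination_by (16384 - a).toNat
decreasing_by omega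

-- A's loop: returns the first (least) qualifying nonce in the remaining range
lemma loopA_found (header target : Int) (a n0 : Int)
    (ha : a ≤ n0) (hn0 : n0 < 16384) (hq : hashA header n0 < target)
    (hmin : ∀ n, a ≤ n → n < n0 → ¬ hashA header n < target) :
    mineLoopA header target (PySem.List.pyRange a 16384 1) = (n0, hashA header n0) := by
  have hlt : a < 16384 := by omega
  rw [PySem.List.pyRange_one_cons hlt]
  unfold mineLoopA
  simp only [mod_hashA]
  by_cases hcase : a = n0
  · subst hcase
    rw [if_pos hq]
  · rw [if_neg (hmin a le_rfl (by omega))]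
    exact loopA_found header target (a + 1) n0 (by omega) hn0 hq
      (fun n hn h2 => hmin n (by omega) h2)
termination_by (16384 - a).toNat
decreasing_by omega

-- the fold B performs (re-stated for the invariant proof)
def stepB (base : Int) (best : Option (Int × Int)) (t : Int) : Option (Int × Int) :=
  let nonce := invNonce base t
  match best with
  | none => some (nonce, t)
  | some b => if nonce < b.1 then some (nonce, t) else some b

lemma foldB_inv (base : Int) (L : List Int) (acc : Option (Int × Int)) :
    match L.foldl (stepB base) acc with
    | none => acc = none ∧ L = []
    | some b => (acc = some b ∨ (b.2 ∈ L ∧ b.1 = invNonce base b.2))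
        ∧ (∀ t ∈ L, b.1 ≤ invNonce base t)
        ∧ (∀ c, acc = some c → b.1 ≤ c.1) := by
  induction L generalizing acc with
  | nil => cases acc <;> simp [List.foldl]
  | cons t L ih =>
    have hstep := ih (stepB base acc t)
    simp only [List.foldl_cons]
    cases hres : (L.foldl (stepB base) (stepB base acc t)) with
    | none =>
      rw [hres] at hstep
      exfalso
      rcases hstep with ⟨hnone, -⟩
      cases acc with
      | none => simp [stepB] at hnone
      | some c =>
        simp only [stepB] at hnone
        split at hnone <;> simp at hnone
    | some b =>
      rw [hres] at hstep
      rcases hstep with ⟨h1, h2, h3⟩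
      have hhead : b.1 ≤ invNonce base t := by
        cases acc with
        | none =>
          exact h3 (invNonce base t, t) (by simp [stepB])
        | some c =>
          by_cases hlt : invNonce base t < c.1
          · exact h3 (invNonce base t, t) (by simp [stepB, hlt])
          · have := h3 c (by simp [stepB, hlt])
            omega
      refine ⟨?_, ?_, ?_⟩
      · rcases h1 with h1 | h1
        · cases acc with
          | none =>
            right
            simp only [stepB] at h1
            cases h1
            exact ⟨List.mem_cons_self, rfl⟩
          | some c =>
            simp only [stepB] at h1
            split at h1
            · right
              cases h1
              exact ⟨List.mem_cons_self, rfl⟩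
            · left
              cases h1
              rfl
        · exact Or.inr ⟨List.mem_cons_of_mem _ h1.1, h1.2⟩
      · intro t' ht'
        rcases List.mem_cons.mp ht' with rfl | ht'
        · exact hhead
        · exact h2 t' ht'
      · intro c hc
        subst hc
        by_cases hlt : invNonce base t < c.1
        · omega
        · exact h3 c (by simp [stepB, hlt])

-- main equivalence, unpacked
lemma mine_eq (header target : Int) : mine_python header target = mine_python_alt header target := by
  unfold mine_python mine_python_alt
  set base := PySem.Int.mod (header * 7919) 16384 with hbase
  set bound := min target 16384 with hbound
  by_cases hpos : 0 < bound
  · -- the residue range is nonempty: B returns some minimal preimage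
    have hinv := foldB_inv base (PySem.List.pyRange 0 bound 1) none
    cases hres : (PySem.List.pyRange 0 bound 1).foldl (stepB base) none with
    | none =>
      rw [hres] at hinv
      rcases hinv with ⟨-, h2⟩
      rw [PySem.List.pyRange_one_cons (by omega)] at h2
      simp at h2
    | some b =>
      rw [hres] at hinv
      rcases hinv with ⟨h1, h2, -⟩
      rcases h1 with h1 | ⟨hmem, hval⟩
      · simp at h1
      obtain ⟨ht0, ht1⟩ := (PySem.List.mem_pyRange_one.mp hmem)
      have htM : b.2 < 16384 := by omega
      have hhash : hashA header b.1 = b.2 := by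
        rw [hval]; exact hash_invNonce header b.2 ht0 htM
      have hbb := invNonce_bounds base b.2
      have hb1_0 : 0 ≤ b.1 := by rw [hval]; exact hbb.1
      have hb1_M : b.1 < 16384 := by rw [hval]; exact hbb.2
      have hq : hashA header b.1 < target := by rw [hhash]; omega
      have hmin : ∀ n, (0:Int) ≤ n → n < b.1 → ¬ hashA header n < target := by
        intro n hn0 hnb habs
        have hnM : n < 16384 := by omega
        have hh0 := (hashA_bounds header n).1
        have hhM := (hashA_bounds header n).2
        have hmem' : hashA header n ∈ PySem.List.pyRange 0 bound 1 :=
          PySem.List.mem_pyRange_one.mpr ⟨hh0, by omega⟩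
        have := h2 _ hmem'
        rw [invNonce_hash header n hn0 hnM] at this
        omega
      have := loopA_found header target 0 b.1 hb1_0 hb1_M hq hmin
      -- the foldl in the goal is the same fold as stepB
      have hfold : ((PySem.List.pyRange 0 bound 1).foldl
          (fun best t =>
            let nonce := invNonce base t
            match best with
            | none => some (nonce, t)
            | some b => if nonce < b.1 then some (nonce, t) else some b)
          none) = some b := hres
      simp only [hfold]
      rw [this, hhash]
  · -- bound ≤ 0: range empty on B's side, and no hash can be < target on A's
    have hnil : PySem.List.pyRange 0 bound 1 = [] :=
      PySem.List.pyRange_one_eq_nil (by omega)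
    rw [hnil]
    simp only [List.foldl_nil]
    have : ∀ n, (0:Int) ≤ n → n < 16384 → ¬ hashA header n < target := by
      intro n h0 h1 habs
      have := (hashA_bounds header n).1
      omega
    rw [loopA_none header target 0 this]

-- ===== VERDICT (by name: the statement is the Claim_ definition above) =====
theorem mine_python_spec : Claim_equal_mine_python := by
  intro header target _
  unfold Spec_mine_python
  exact mine_eq header target
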